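-- pv_equiv track=rewrite | github.com/tmdgh1592/PROBLEM_SOLVE | 110 옮기기.py | solution
-- ===== SOURCE A (Python) =====
-- def solution(s):
--     answer = []
--     for string in s:
--         stack = ""
--         cnt = 0
--         for x in string:
--             if x == "0" and stack[-2:] == "11":
--                 stack = stack[:-2]
--                 cnt += 1
--             else:
--                 stack += x
--
--         idx = stack.find("111")
--         if idx != -1:
--             result = stack[:idx] + "110" * cnt + stack[idx:]
--         else:
--             idx = stack.rfind("0")
--             result = stack[:idx+1] + "110" * cnt + stack[idx+1:]
--         answer.append(result)
--     return answer
-- ===== SOURCE B (Python) =====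
-- def solution(s):
--     # One pass per string, no character stack and no search passes:
--     # pending '1's are a counter (a "110" removal is ones -= 2 when a '0'
--     # arrives with ones >= 2); everything else is emitted as a chunk
--     # '1'*ones + x, so the reduced string is chunks + '1'*ones.  "111" can
--     # only start a chunk and '0' can only end one, so the reinsertion
--     # position (first "111", else after the last '0') is recorded while
--     # emitting instead of being searched for afterwards.
--     answer = []
--     for string in s:
--         head = []
--         headlen = 0
--         ones = 0
--         cnt = 0
--         first111 = -1
--         last0 = -1
--         for x in string:
--             if x == "1":
--                 ones += 1
--             elif x == "0" and ones >= 2: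
--                 ones -= 2
--                 cnt += 1
--             else:
--                 if first111 < 0 and ones >= 3:
--                     first111 = headlen
--                 head.append("1" * ones + x)
--                 headlen += ones + 1
--                 if x == "0":
--                     last0 = headlen - 1
--                 ones = 0
--         if first111 >= 0:
--             pos = first111
--         elif ones >= 3:
--             pos = headlen
--         else:
--             pos = last0 + 1
--         joined = "".join(head)
--         answer.append(joined[:pos] + "110" * cnt + joined[pos:] + "1" * ones)
--     return answer
-- ===== Notes on version B (the rewrite author's own statement) =====
-- stated objective: alternative
-- what changed: B replaces A's character stack with slicing plus two post-scans (find('111'), rfind('0')) by a single pass that keeps a counter of pending '1's and emits (1*.x) chunks; since '111' can only start a chunk (or the trailing run) and '0' can only end one, the reinsertion position is recorded during the pass instead of being searched for afterwards; it trades A's C-level string primitives for explicit Python-level bookkeeping, so it is not measurably faster.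
import Mathlib
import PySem

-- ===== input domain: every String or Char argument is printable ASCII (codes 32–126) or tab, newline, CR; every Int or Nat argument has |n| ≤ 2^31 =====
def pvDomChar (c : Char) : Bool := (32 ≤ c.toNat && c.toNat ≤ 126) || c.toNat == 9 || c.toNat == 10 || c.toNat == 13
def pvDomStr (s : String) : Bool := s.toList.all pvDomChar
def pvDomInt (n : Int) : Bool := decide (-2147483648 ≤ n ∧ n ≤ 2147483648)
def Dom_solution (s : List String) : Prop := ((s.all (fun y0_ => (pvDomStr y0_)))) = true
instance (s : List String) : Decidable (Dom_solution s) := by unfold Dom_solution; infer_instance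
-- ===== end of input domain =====

-- B replaces A's character stack + two search passes (find("111"), rfind("0")) by a
-- single pass with a counter of pending '1's; the reinsertion position is recorded
-- while emitting chunks instead of being searched for afterwards.

-- "110" * cnt (the same Python expression occurs in both programs)
def rep110 (cnt : Nat) : List Char := (List.replicate cnt ['1', '1', '0']).flatten

-- ===== PORT A =====
def solutionStepA (st : List Char × Nat) (x : Char) : List Char × Nat :=
  if x = '0' ∧ PySem.List.slice st.1 (some (-2)) none = ['1', '1'] then
    (PySem.List.slice st.1 none (some (-2)), st.2 + 1)
  else
    (st.1 ++ [x], st.2)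

def solutionTailA (stack : List Char) (cnt : Nat) : List Char :=
  let idx := PySem.Chars.find stack ['1', '1', '1']
  if idx ≠ -1 then
    PySem.List.slice stack none (some idx) ++ rep110 cnt ++ PySem.List.slice stack (some idx) none
  else
    let idx2 := PySem.Chars.rfind stack ['0']
    PySem.List.slice stack none (some (idx2 + 1)) ++ rep110 cnt ++
      PySem.List.slice stack (some (idx2 + 1)) none

def solutionOneA (str : String) : String :=
  let p := str.toList.foldl solutionStepA ([], 0)
  String.ofList (solutionTailA p.1 p.2)

def solution (s : List String) : List String :=
  s.foldl (fun answer str => answer ++ [solutionOneA str]) []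

-- ===== PORT B =====
-- state (head, headlen, ones, cnt, first111, last0): head is the emitted chunks
-- (joined), ones the pending '1's, first111/last0 the recorded positions (-1 = none)
def solutionStepB (st : List Char × Nat × Nat × Nat × Int × Int) (x : Char) :
    List Char × Nat × Nat × Nat × Int × Int :=
  match st with
  | (head, headlen, ones, cnt, first111, last0) =>
    if x = '1' then (head, headlen, ones + 1, cnt, first111, last0)
    else if x = '0' ∧ 2 ≤ ones then (head, headlen, ones - 2, cnt + 1, first111, last0)
    else
      (head ++ (List.replicate ones '1' ++ [x]), headlen + ones + 1, 0, cnt,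
       if first111 < 0 ∧ 3 ≤ ones then (headlen : Int) else first111,
       if x = '0' then ((headlen + ones + 1 : Nat) : Int) - 1 else last0)

-- joined[:pos]/joined[pos:] with pos ≥ 0 port as take/drop
def solutionOneB (str : String) : String :=
  match str.toList.foldl solutionStepB ([], 0, 0, 0, -1, -1) with
  | (head, headlen, ones, cnt, first111, last0) =>
    let pos : Int := if 0 ≤ first111 then first111
                     else if 3 ≤ ones then (headlen : Int) else last0 + 1
    String.ofList (head.take pos.toNat ++ rep110 cnt ++ head.drop pos.toNat ++
      List.replicate ones '1')

def solution_alt (s : List String) : List String := s.map solutionOneB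

-- ===== PRECONDITION & SPEC =====
def Spec_solution (s : List String) (out : List String) : Prop := out = solution_alt s
instance (s : List String) (out : List String) : Decidable (Spec_solution s out) := by unfold Spec_solution; infer_instance

-- ===== CLAIM (what is proved, stated in full; the proofs are below) =====
def Claim_equal_solution : Prop :=
  ∀ (s : List String), Dom_solution s → Spec_solution s (solution s)

-- ===== LEMMAS AND PROOFS =====

-- invariant of B's state: headlen is head's length, head ends in a non-'1' chunk
-- terminator, and first111/last0 are exactly A's find("111")/rfind("0") on head
def InvB (st : List Char × Nat × Nat × Nat × Int × Int) : Prop :=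
  st.2.1 = st.1.length ∧
  (st.1 = [] ∨ st.1[st.1.length - 1]? ≠ some '1') ∧
  st.2.2.2.2.1 = PySem.Chars.find st.1 ['1', '1', '1'] ∧
  st.2.2.2.2.2 = PySem.Chars.rfind st.1 ['0']

-- A's state abstracted from B's
def AbsB (st : List Char × Nat × Nat × Nat × Int × Int) : List Char × Nat :=
  (st.1 ++ List.replicate st.2.2.1 '1', st.2.2.2.1)

-- the three-element prefix of a drop, through getElem?
lemma prefix_drop_iff3 (l : List Char) (i : Nat) :
    (['1', '1', '1'] <+: l.drop i) ↔
      (l[i]? = some '1' ∧ l[i + 1]? = some '1' ∧ l[i + 2]? = some '1') := by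
  have h0 : (l.drop i)[0]? = l[i]? := by simp
  have h1 : (l.drop i)[1]? = l[i + 1]? := by simp
  have h2 : (l.drop i)[2]? = l[i + 2]? := by simp
  rw [← h0, ← h1, ← h2]; clear h0 h1 h2
  generalize l.drop i = d
  rcases d with _ | ⟨a, _ | ⟨b, _ | ⟨c, t⟩⟩⟩
  · simp
  · simp [List.cons_prefix_cons]
  · simp [List.cons_prefix_cons]
  · simp [List.cons_prefix_cons, eq_comm]

lemma prefix_drop_iff1 (l : List Char) (i : Nat) :
    (['0'] <+: l.drop i) ↔ l[i]? = some '0' := by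
  have h0 : (l.drop i)[0]? = l[i]? := by simp
  rw [← h0]; clear h0
  generalize l.drop i = d
  rcases d with _ | ⟨a, t⟩
  · simp
  · simp [List.cons_prefix_cons, eq_comm]

-- getElem? of head ++ replicate n '1'
lemma getElem?_hr (h : List Char) (n i : Nat) :
    (h ++ List.replicate n '1')[i]? =
      if i < h.length then h[i]? else if i < h.length + n then some '1' else none := by
  by_cases h1 : i < h.length
  · rw [if_pos h1, List.getElem?_append_left h1]
  · rw [if_neg h1, List.getElem?_append_right (by omega), List.getElem?_replicate]
    by_cases h2 : i < h.length + n
    · rw [if_pos h2, if_pos (by omega)]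
    · rw [if_neg h2, if_neg (by omega)]

-- getElem? of head ++ (replicate k '1' ++ [y])
lemma getElem?_hk (h : List Char) (k i : Nat) (y : Char) :
    (h ++ (List.replicate k '1' ++ [y]))[i]? =
      if i < h.length then h[i]? else if i < h.length + k then some '1'
      else if i = h.length + k then some y else none := by
  by_cases h1 : i < h.length
  · rw [if_pos h1, List.getElem?_append_left h1]
  · rw [if_neg h1, List.getElem?_append_right (by omega)]
    by_cases h2 : i < h.length + k
    · rw [if_pos h2, List.getElem?_append_left (by simp; omega), List.getElem?_replicate,
        if_pos (by omega)]
    · rw [if_neg h2, List.getElem?_append_right (by simp; omega)]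
      by_cases h3 : i = h.length + k
      · rw [if_pos h3]
        simp [h3]
      · rw [if_neg h3]
        simp
        omega

-- no occurrence of "111" inside a list whose find is -1
lemma no_occ_of_find_neg (h : List Char) (hf : PySem.Chars.find h ['1', '1', '1'] = -1) :
    ∀ j, ¬ (['1', '1', '1'] <+: h.drop j) := by
  intro j hj
  refine (PySem.Chars.find_eq_neg_one_iff _ _).mp hf ?_
  rw [← PySem.Chars.isIn_iff_infix, ← PySem.Chars.exists_prefix_drop_iff_isIn]
  exact ⟨j, hj⟩

-- an occurrence of "111" cannot straddle head's right edge
lemma no_straddle (h t : List Char) (he : h = [] ∨ h[h.length - 1]? ≠ some '1')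
    {j : Nat} (hj : j < h.length) (hj2 : ¬ j + 2 < h.length)
    (e1 : (h ++ t)[j]? = some '1') (e2 : (h ++ t)[j + 1]? = some '1') : False := by
  rcases he with hnil | hlast
  · have : h.length = 0 := by rw [hnil]; rfl
    omega
  · apply hlast
    by_cases c : j = h.length - 1
    · rw [← c, ← List.getElem?_append_left hj]
      exact e1
    · have : j + 1 = h.length - 1 := by omega
      rw [← this, ← List.getElem?_append_left (by omega)]
      exact e2

-- find("111") after appending a chunk  replicate k '1' ++ [y]  (y ≠ '1')
lemma find3_chunk (h : List Char) (k : Nat) (y : Char) (hy : y ≠ '1')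
    (he : h = [] ∨ h[h.length - 1]? ≠ some '1') :
    PySem.Chars.find (h ++ (List.replicate k '1' ++ [y])) ['1', '1', '1'] =
      if PySem.Chars.find h ['1', '1', '1'] = -1 then
        (if 3 ≤ k then (h.length : Int) else -1)
      else PySem.Chars.find h ['1', '1', '1'] := by
  by_cases hf : PySem.Chars.find h ['1', '1', '1'] = -1
  · rw [if_pos hf]
    have hno := no_occ_of_find_neg h hf
    by_cases h3 : 3 ≤ k
    · rw [if_pos h3]
      have hocc : ['1', '1', '1'] <+: (h ++ (List.replicate k '1' ++ [y])).drop h.length := by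
        rw [prefix_drop_iff3]
        refine ⟨?_, ?_, ?_⟩ <;>
          rw [getElem?_hk, if_neg (by omega), if_pos (by omega)]
      have hnn : 0 ≤ PySem.Chars.find (h ++ (List.replicate k '1' ++ [y])) ['1', '1', '1'] := by
        refine (PySem.Chars.find_nonneg_iff _ _).mpr ?_
        rw [← PySem.Chars.isIn_iff_infix, ← PySem.Chars.exists_prefix_drop_iff_isIn]
        exact ⟨h.length, hocc⟩
      obtain ⟨hfp, hfm⟩ := PySem.Chars.find_spec hnn
      have hle : (PySem.Chars.find (h ++ (List.replicate k '1' ++ [y])) ['1', '1', '1']).toNat ≤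
          h.length := by
        by_contra hgt
        exact hfm h.length (by omega) hocc
      have hge : h.length ≤
          (PySem.Chars.find (h ++ (List.replicate k '1' ++ [y])) ['1', '1', '1']).toNat := by
        by_contra hlt
        rw [prefix_drop_iff3] at hfp
        obtain ⟨e1, e2, e3⟩ := hfp
        by_cases c2 : (PySem.Chars.find (h ++ (List.replicate k '1' ++ [y])) ['1', '1', '1']).toNat
            + 2 < h.length
        · rw [getElem?_hk, if_pos (by omega)] at e1
          rw [getElem?_hk, if_pos (by omega)] at e2
          rw [getElem?_hk, if_pos (by omega)] at e3
          exact hno _ ((prefix_drop_iff3 h _).mpr ⟨e1, e2, e3⟩)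
        · exact no_straddle h _ he (by omega) c2 e1 e2
      omega
    · rw [if_neg h3, PySem.Chars.find_eq_neg_one_iff]
      intro hinf
      rw [← PySem.Chars.isIn_iff_infix, ← PySem.Chars.exists_prefix_drop_iff_isIn] at hinf
      obtain ⟨j, hj⟩ := hinf
      rw [prefix_drop_iff3] at hj
      obtain ⟨e1, e2, e3⟩ := hj
      have hv1 : ∀ i, (h ++ (List.replicate k '1' ++ [y]))[i]? = some '1' →
          i < h.length + k := by
        intro i hi
        rw [getElem?_hk] at hi
        split_ifs at hi with c1 c2 c3
        all_goals first
          | omega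
          | exact absurd (by simpa using hi) hy
          | simp at hi
      have b3 := hv1 _ e3
      by_cases c2 : j + 2 < h.length
      · rw [getElem?_hk, if_pos (by omega)] at e1
        rw [getElem?_hk, if_pos (by omega)] at e2
        rw [getElem?_hk, if_pos (by omega)] at e3
        exact hno j ((prefix_drop_iff3 h j).mpr ⟨e1, e2, e3⟩)
      · by_cases c1 : j < h.length
        · exact no_straddle h _ he c1 c2 e1 e2
        · omega
  · rw [if_neg hf]
    have hnn0 : 0 ≤ PySem.Chars.find h ['1', '1', '1'] := by
      have := PySem.Chars.neg_one_le_find h ['1', '1', '1']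
      omega
    obtain ⟨hfp0, hfm0⟩ := PySem.Chars.find_spec hnn0
    have hlen3 : (PySem.Chars.find h ['1', '1', '1']).toNat + 3 ≤ h.length := by
      have := hfp0.length_le
      simp at this
      omega
    rw [prefix_drop_iff3] at hfp0
    obtain ⟨d1, d2, d3⟩ := hfp0
    have hocc : ['1', '1', '1'] <+:
        (h ++ (List.replicate k '1' ++ [y])).drop (PySem.Chars.find h ['1', '1', '1']).toNat := by
      rw [prefix_drop_iff3]
      refine ⟨?_, ?_, ?_⟩ <;> rw [getElem?_hk, if_pos (by omega)]
      · exact d1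
      · exact d2
      · exact d3
    have hnn : 0 ≤ PySem.Chars.find (h ++ (List.replicate k '1' ++ [y])) ['1', '1', '1'] := by
      refine (PySem.Chars.find_nonneg_iff _ _).mpr ?_
      rw [← PySem.Chars.isIn_iff_infix, ← PySem.Chars.exists_prefix_drop_iff_isIn]
      exact ⟨_, hocc⟩
    obtain ⟨hfp, hfm⟩ := PySem.Chars.find_spec hnn
    have hle : (PySem.Chars.find (h ++ (List.replicate k '1' ++ [y])) ['1', '1', '1']).toNat ≤
        (PySem.Chars.find h ['1', '1', '1']).toNat := by
      by_contra hgt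
      exact hfm _ (by omega) hocc
    have hge : (PySem.Chars.find h ['1', '1', '1']).toNat ≤
        (PySem.Chars.find (h ++ (List.replicate k '1' ++ [y])) ['1', '1', '1']).toNat := by
      by_contra hlt
      rw [prefix_drop_iff3] at hfp
      obtain ⟨e1, e2, e3⟩ := hfp
      rw [getElem?_hk, if_pos (by omega)] at e1
      rw [getElem?_hk, if_pos (by omega)] at e2
      rw [getElem?_hk, if_pos (by omega)] at e3
      exact hfm0 _ (by omega) ((prefix_drop_iff3 h _).mpr ⟨e1, e2, e3⟩)
    omega

-- find("111") after appending the trailing run of '1's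
lemma find3_fin (h : List Char) (n : Nat)
    (he : h = [] ∨ h[h.length - 1]? ≠ some '1') :
    PySem.Chars.find (h ++ List.replicate n '1') ['1', '1', '1'] =
      if PySem.Chars.find h ['1', '1', '1'] = -1 then
        (if 3 ≤ n then (h.length : Int) else -1)
      else PySem.Chars.find h ['1', '1', '1'] := by
  by_cases hf : PySem.Chars.find h ['1', '1', '1'] = -1
  · rw [if_pos hf]
    have hno := no_occ_of_find_neg h hf
    by_cases h3 : 3 ≤ n
    · rw [if_pos h3]
      have hocc : ['1', '1', '1'] <+: (h ++ List.replicate n '1').drop h.length := by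
        rw [prefix_drop_iff3]
        refine ⟨?_, ?_, ?_⟩ <;>
          rw [getElem?_hr, if_neg (by omega), if_pos (by omega)]
      have hnn : 0 ≤ PySem.Chars.find (h ++ List.replicate n '1') ['1', '1', '1'] := by
        refine (PySem.Chars.find_nonneg_iff _ _).mpr ?_
        rw [← PySem.Chars.isIn_iff_infix, ← PySem.Chars.exists_prefix_drop_iff_isIn]
        exact ⟨h.length, hocc⟩
      obtain ⟨hfp, hfm⟩ := PySem.Chars.find_spec hnn
      have hle : (PySem.Chars.find (h ++ List.replicate n '1') ['1', '1', '1']).toNat ≤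
          h.length := by
        by_contra hgt
        exact hfm h.length (by omega) hocc
      have hge : h.length ≤
          (PySem.Chars.find (h ++ List.replicate n '1') ['1', '1', '1']).toNat := by
        by_contra hlt
        rw [prefix_drop_iff3] at hfp
        obtain ⟨e1, e2, e3⟩ := hfp
        by_cases c2 : (PySem.Chars.find (h ++ List.replicate n '1') ['1', '1', '1']).toNat
            + 2 < h.length
        · rw [getElem?_hr, if_pos (by omega)] at e1
          rw [getElem?_hr, if_pos (by omega)] at e2
          rw [getElem?_hr, if_pos (by omega)] at e3
          exact hno _ ((prefix_drop_iff3 h _).mpr ⟨e1, e2, e3⟩)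
        · exact no_straddle h _ he (by omega) c2 e1 e2
      omega
    · rw [if_neg h3, PySem.Chars.find_eq_neg_one_iff]
      intro hinf
      rw [← PySem.Chars.isIn_iff_infix, ← PySem.Chars.exists_prefix_drop_iff_isIn] at hinf
      obtain ⟨j, hj⟩ := hinf
      rw [prefix_drop_iff3] at hj
      obtain ⟨e1, e2, e3⟩ := hj
      have b3 : j + 2 < h.length + n := by
        by_contra hc
        rw [getElem?_hr, if_neg (by omega), if_neg (by omega)] at e3
        simp at e3
      by_cases c2 : j + 2 < h.length
      · rw [getElem?_hr, if_pos (by omega)] at e1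
        rw [getElem?_hr, if_pos (by omega)] at e2
        rw [getElem?_hr, if_pos (by omega)] at e3
        exact hno j ((prefix_drop_iff3 h j).mpr ⟨e1, e2, e3⟩)
      · by_cases c1 : j < h.length
        · exact no_straddle h _ he c1 c2 e1 e2
        · omega
  · rw [if_neg hf]
    have hnn0 : 0 ≤ PySem.Chars.find h ['1', '1', '1'] := by
      have := PySem.Chars.neg_one_le_find h ['1', '1', '1']
      omega
    obtain ⟨hfp0, hfm0⟩ := PySem.Chars.find_spec hnn0
    have hlen3 : (PySem.Chars.find h ['1', '1', '1']).toNat + 3 ≤ h.length := by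
      have := hfp0.length_le
      simp at this
      omega
    rw [prefix_drop_iff3] at hfp0
    obtain ⟨d1, d2, d3⟩ := hfp0
    have hocc : ['1', '1', '1'] <+:
        (h ++ List.replicate n '1').drop (PySem.Chars.find h ['1', '1', '1']).toNat := by
      rw [prefix_drop_iff3]
      refine ⟨?_, ?_, ?_⟩ <;> rw [getElem?_hr, if_pos (by omega)]
      · exact d1
      · exact d2
      · exact d3
    have hnn : 0 ≤ PySem.Chars.find (h ++ List.replicate n '1') ['1', '1', '1'] := by
      refine (PySem.Chars.find_nonneg_iff _ _).mpr ?_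
      rw [← PySem.Chars.isIn_iff_infix, ← PySem.Chars.exists_prefix_drop_iff_isIn]
      exact ⟨_, hocc⟩
    obtain ⟨hfp, hfm⟩ := PySem.Chars.find_spec hnn
    have hle : (PySem.Chars.find (h ++ List.replicate n '1') ['1', '1', '1']).toNat ≤
        (PySem.Chars.find h ['1', '1', '1']).toNat := by
      by_contra hgt
      exact hfm _ (by omega) hocc
    have hge : (PySem.Chars.find h ['1', '1', '1']).toNat ≤
        (PySem.Chars.find (h ++ List.replicate n '1') ['1', '1', '1']).toNat := by
      by_contra hlt
      rw [prefix_drop_iff3] at hfp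
      obtain ⟨e1, e2, e3⟩ := hfp
      rw [getElem?_hr, if_pos (by omega)] at e1
      rw [getElem?_hr, if_pos (by omega)] at e2
      rw [getElem?_hr, if_pos (by omega)] at e3
      exact hfm0 _ (by omega) ((prefix_drop_iff3 h _).mpr ⟨e1, e2, e3⟩)
    omega

-- what rfind.go has computed: either no match up to j, or the largest match index
lemma rfind_go_cases (s : List Char) (j : Nat) :
    (PySem.Chars.rfind.go s ['0'] j = -1 ∧ ∀ i ≤ j, ¬ ['0'].isPrefixOf (s.drop i) = true) ∨
    (∃ m ≤ j, PySem.Chars.rfind.go s ['0'] j = (m : Int) ∧ ['0'].isPrefixOf (s.drop m) = true ∧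
      ∀ i, m < i → i ≤ j → ¬ ['0'].isPrefixOf (s.drop i) = true) := by
  induction j with
  | zero =>
    by_cases h : ['0'].isPrefixOf (s.drop 0) = true
    · right
      refine ⟨0, le_refl _, ?_, h, fun i h1 h2 => by omega⟩
      simp only [PySem.Chars.rfind.go]
      rw [if_pos (by simpa using h)]
      simp
    · left
      refine ⟨?_, fun i hi => by rw [Nat.le_zero.mp hi]; exact h⟩
      simp only [PySem.Chars.rfind.go]
      rw [if_neg (by simpa using h)]
  | succ j ih =>
    by_cases h : ['0'].isPrefixOf (s.drop (j + 1)) = true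
    · right
      refine ⟨j + 1, le_refl _, ?_, h, fun i h1 h2 => by omega⟩
      simp only [PySem.Chars.rfind.go]
      rw [if_pos h]
    · rcases ih with ⟨hval, habove⟩ | ⟨m, hm, hval, hp, habove⟩
      · left
        refine ⟨?_, fun i hi => ?_⟩
        · simp only [PySem.Chars.rfind.go]
          rw [if_neg h]
          exact hval
        · by_cases hij : i ≤ j
          · exact habove i hij
          · rw [show i = j + 1 by omega]; exact h
      · right
        refine ⟨m, by omega, ?_, hp, fun i h1 h2 => ?_⟩
        · simp only [PySem.Chars.rfind.go]
          rw [if_neg h]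
          exact hval
        · by_cases hij : i ≤ j
          · exact habove i h1 hij
          · rw [show i = j + 1 by omega]; exact h

lemma rfind_go_eq (s sub : List Char) (m j : Nat) (hmj : m ≤ j)
    (hm : sub.isPrefixOf (s.drop m))
    (habove : ∀ i, m < i → i ≤ j → ¬ sub.isPrefixOf (s.drop i) = true) :
    PySem.Chars.rfind.go s sub j = m := by
  induction j with
  | zero =>
    have h0 : m = 0 := by omega
    subst h0
    simp only [PySem.Chars.rfind.go]
    rw [if_pos (by simpa using hm)]
    simp
  | succ j ih =>
    by_cases hmj' : m = j + 1
    · subst hmj'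
      simp only [PySem.Chars.rfind.go]
      rw [if_pos hm]
    · have h1 : ¬ sub.isPrefixOf (s.drop (j + 1)) = true :=
        habove (j + 1) (by omega) (le_refl _)
      simp only [PySem.Chars.rfind.go]
      rw [if_neg h1]
      exact ih (by omega) (fun i h2 h3 => habove i h2 (by omega))

-- rfind("0") is unchanged by appending the trailing run of '1's
lemma rfind0_fin (h : List Char) (n : Nat) :
    PySem.Chars.rfind (h ++ List.replicate n '1') ['0'] = PySem.Chars.rfind h ['0'] := by
  simp only [PySem.Chars.rfind]
  rcases rfind_go_cases h h.length with ⟨hval, habove⟩ | ⟨m, hm, hval, hp, habove⟩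
  · rw [hval]
    rcases rfind_go_cases (h ++ List.replicate n '1') (h ++ List.replicate n '1').length with
      ⟨hval2, _⟩ | ⟨m2, hm2, hval2, hp2, _⟩
    · rw [hval2]
    · exfalso
      rw [List.isPrefixOf_iff_prefix, prefix_drop_iff1, getElem?_hr] at hp2
      split_ifs at hp2 with c1 c2
      all_goals first
        | exact habove m2 (by omega)
            (by rw [List.isPrefixOf_iff_prefix, prefix_drop_iff1]; exact hp2)
        | simp at hp2
  · have hmlt : m < h.length := by
      rw [List.isPrefixOf_iff_prefix, prefix_drop_iff1] at hp
      by_contra hc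
      rw [List.getElem?_eq_none (by omega)] at hp
      simp at hp
    rw [hval, rfind_go_eq (h ++ List.replicate n '1') ['0'] m
      (h ++ List.replicate n '1').length (by simp; omega) ?hm2 ?hab2]
    case hm2 =>
      rw [List.isPrefixOf_iff_prefix, prefix_drop_iff1, getElem?_hr, if_pos hmlt]
      rw [List.isPrefixOf_iff_prefix, prefix_drop_iff1] at hp
      exact hp
    case hab2 =>
      intro i hi1 hi2
      rw [List.isPrefixOf_iff_prefix, prefix_drop_iff1, getElem?_hr]
      split_ifs with c1 c2
      all_goals first
        | (intro hc
           exact habove i hi1 (by omega)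
             (by rw [List.isPrefixOf_iff_prefix, prefix_drop_iff1]; exact hc))
        | simp

-- rfind("0") after appending a chunk  replicate k '1' ++ [y]
lemma rfind0_chunk (h : List Char) (k : Nat) (y : Char) :
    PySem.Chars.rfind (h ++ (List.replicate k '1' ++ [y])) ['0'] =
      if y = '0' then ((h.length + k : Nat) : Int) else PySem.Chars.rfind h ['0'] := by
  by_cases hy : y = '0'
  · rw [if_pos hy]
    simp only [PySem.Chars.rfind]
    rw [rfind_go_eq (h ++ (List.replicate k '1' ++ [y])) ['0'] (h.length + k)
      (h ++ (List.replicate k '1' ++ [y])).length (by simp) ?hm ?hab]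
    case hm =>
      rw [List.isPrefixOf_iff_prefix, prefix_drop_iff1, getElem?_hk,
        if_neg (by omega), if_neg (by omega), if_pos rfl, hy]
    case hab =>
      intro i hi1 hi2
      rw [List.isPrefixOf_iff_prefix, prefix_drop_iff1, getElem?_hk,
        if_neg (by omega), if_neg (by omega), if_neg (by omega)]
      simp
  · rw [if_neg hy]
    simp only [PySem.Chars.rfind]
    rcases rfind_go_cases h h.length with ⟨hval, habove⟩ | ⟨m, hm, hval, hp, habove⟩
    · rw [hval]
      rcases rfind_go_cases (h ++ (List.replicate k '1' ++ [y]))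
          (h ++ (List.replicate k '1' ++ [y])).length with
        ⟨hval2, _⟩ | ⟨m2, hm2, hval2, hp2, _⟩
      · rw [hval2]
      · exfalso
        rw [List.isPrefixOf_iff_prefix, prefix_drop_iff1, getElem?_hk] at hp2
        split_ifs at hp2 with c1 c2 c3
        all_goals first
          | exact habove m2 (by omega)
              (by rw [List.isPrefixOf_iff_prefix, prefix_drop_iff1]; exact hp2)
          | exact hy (by simpa using hp2)
          | simp at hp2
    · have hmlt : m < h.length := by
        rw [List.isPrefixOf_iff_prefix, prefix_drop_iff1] at hp
        by_contra hc
        rw [List.getElem?_eq_none (by omega)] at hp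
        simp at hp
      rw [hval, rfind_go_eq (h ++ (List.replicate k '1' ++ [y])) ['0'] m
        (h ++ (List.replicate k '1' ++ [y])).length (by simp; omega) ?hm2 ?hab2]
      case hm2 =>
        rw [List.isPrefixOf_iff_prefix, prefix_drop_iff1, getElem?_hk, if_pos hmlt]
        rw [List.isPrefixOf_iff_prefix, prefix_drop_iff1] at hp
        exact hp
      case hab2 =>
        intro i hi1 hi2
        rw [List.isPrefixOf_iff_prefix, prefix_drop_iff1, getElem?_hk]
        split_ifs with c1 c2 c3
        all_goals first
          | (intro hc
             exact habove i hi1 (by omega)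
               (by rw [List.isPrefixOf_iff_prefix, prefix_drop_iff1]; exact hc))
          | (intro hc
             exact hy (by simpa using hc))
          | simp

-- bounds for find / rfind used by the final slicing step
lemma find3_bound (h : List Char) (hnn : 0 ≤ PySem.Chars.find h ['1', '1', '1']) :
    (PySem.Chars.find h ['1', '1', '1']).toNat + 3 ≤ h.length := by
  obtain ⟨hfp, _⟩ := PySem.Chars.find_spec hnn
  have := hfp.length_le
  simp at this
  omega

lemma rfind0_bounds (h : List Char) :
    -1 ≤ PySem.Chars.rfind h ['0'] ∧ PySem.Chars.rfind h ['0'] < h.length := by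
  simp only [PySem.Chars.rfind]
  rcases rfind_go_cases h h.length with ⟨hval, _⟩ | ⟨m, hm, hval, hp, _⟩
  · rw [hval]
    constructor
    · omega
    · omega
  · have hmlt : m < h.length := by
      rw [List.isPrefixOf_iff_prefix, prefix_drop_iff1] at hp
      by_contra hc
      rw [List.getElem?_eq_none (by omega)] at hp
      simp at hp
    rw [hval]
    omega

-- A's final search-and-splice equals B's recorded-position splice
lemma tail_eq (h : List Char) (n cnt : Nat)
    (he : h = [] ∨ h[h.length - 1]? ≠ some '1') :
    solutionTailA (h ++ List.replicate n '1') cnt =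
      h.take (if 0 ≤ PySem.Chars.find h ['1', '1', '1'] then PySem.Chars.find h ['1', '1', '1']
        else if 3 ≤ n then (h.length : Int) else PySem.Chars.rfind h ['0'] + 1).toNat ++
      rep110 cnt ++
      h.drop (if 0 ≤ PySem.Chars.find h ['1', '1', '1'] then PySem.Chars.find h ['1', '1', '1']
        else if 3 ≤ n then (h.length : Int) else PySem.Chars.rfind h ['0'] + 1).toNat ++
      List.replicate n '1' := by
  simp only [solutionTailA, find3_fin h n he, rfind0_fin h n]
  have hge := PySem.Chars.neg_one_le_find h ['1', '1', '1']
  obtain ⟨hz1, hz2⟩ := rfind0_bounds h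
  by_cases hf : PySem.Chars.find h ['1', '1', '1'] = -1
  · rw [if_pos hf, if_neg (by omega : ¬ 0 ≤ PySem.Chars.find h ['1', '1', '1'])]
    by_cases h3 : 3 ≤ n
    · rw [if_pos h3, if_pos (show ((h.length : Int)) ≠ -1 by omega), if_pos h3,
        PySem.List.slice_to_natCast, PySem.List.slice_from_natCast,
        List.take_left, List.drop_left]
      simp
    · rw [if_neg h3, if_neg (by simp), if_neg h3]
      have h0 : (0 : Int) ≤ PySem.Chars.rfind h ['0'] + 1 := by omega
      rw [PySem.List.slice_to _ h0, PySem.List.slice_from _ h0,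
        List.take_append_of_le_length (by omega), List.drop_append_of_le_length (by omega)]
      simp [List.append_assoc]
  · have hnn : 0 ≤ PySem.Chars.find h ['1', '1', '1'] := by omega
    have hb := find3_bound h hnn
    rw [if_neg hf, if_pos hf, if_pos hnn,
      PySem.List.slice_to _ hnn, PySem.List.slice_from _ hnn,
      List.take_append_of_le_length (by omega), List.drop_append_of_le_length (by omega)]
    simp [List.append_assoc]

-- one step of the two folds corresponds
lemma step_sim (st : List Char × Nat × Nat × Nat × Int × Int) (x : Char) (hI : InvB st) :
    solutionStepA (AbsB st) x = AbsB (solutionStepB st x) ∧ InvB (solutionStepB st x) := by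
  obtain ⟨head, headlen, ones, cnt, f, z⟩ := st
  obtain ⟨hL, hE, hF, hZ⟩ := hI
  replace hL : headlen = head.length := hL
  replace hE : head = [] ∨ head[head.length - 1]? ≠ some '1' := hE
  replace hF : f = PySem.Chars.find head ['1', '1', '1'] := hF
  replace hZ : z = PySem.Chars.rfind head ['0'] := hZ
  by_cases hx1 : x = '1'
  · subst hx1
    refine ⟨?_, ?_⟩
    · simp [solutionStepA, solutionStepB, AbsB, List.replicate_succ', List.append_assoc]
    · exact (⟨hL, hE, hF, hZ⟩ : InvB (head, headlen, ones + 1, cnt, f, z))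
  · by_cases hx2 : x = '0' ∧ 2 ≤ ones
    · obtain ⟨hx0, h2⟩ := hx2
      subst hx0
      have hsl : PySem.List.slice (head ++ List.replicate ones '1') (some (-2)) none
          = ['1', '1'] := by
        rw [PySem.List.slice_from_neg_ofNat _ 2 (by omega)]
        have hlen : (head ++ List.replicate ones '1').length = head.length + ones := by simp
        rw [hlen, show head.length + ones - 2 = head.length + (ones - 2) by omega,
          List.drop_append, List.drop_eq_nil_of_le (by omega),
          show head.length + (ones - 2) - head.length = ones - 2 by omega,
          List.drop_replicate, show ones - (ones - 2) = 2 by omega]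
        rfl
      have htk : PySem.List.slice (head ++ List.replicate ones '1') none (some (-2)) =
          head ++ List.replicate (ones - 2) '1' := by
        rw [PySem.List.slice_to_neg_ofNat _ 2 (by omega)]
        have hlen : (head ++ List.replicate ones '1').length = head.length + ones := by simp
        rw [hlen, show head.length + ones - 2 = head.length + (ones - 2) by omega,
          List.take_append, List.take_of_length_le (by omega),
          show head.length + (ones - 2) - head.length = ones - 2 by omega,
          List.take_replicate, show min (ones - 2) ones = ones - 2 by omega]
      refine ⟨?_, ?_⟩
      · simp only [solutionStepA, solutionStepB, AbsB]
        simp [hsl, htk, h2]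
      · simp only [solutionStepB]
        simp [h2]
        exact ⟨hL, hE, hF, hZ⟩
    · -- a chunk  '1'*ones ++ [x]  is emitted
      have hAcond : ¬ (x = '0' ∧
          PySem.List.slice (head ++ List.replicate ones '1') (some (-2)) none = ['1', '1']) := by
        rintro ⟨hx0, hc⟩
        subst hx0
        have h2 : ¬ 2 ≤ ones := fun hh => hx2 ⟨rfl, hh⟩
        rw [PySem.List.slice_from_neg_ofNat _ 2 (by omega)] at hc
        have hlen : (head ++ List.replicate ones '1').length = head.length + ones := by simp
        have hlen2 : 2 ≤ head.length + ones := by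
          have := congrArg List.length hc
          simp at this
          omega
        have hh : 1 ≤ head.length := by omega
        rcases hE with hnil | hlast
        · have : head.length = 0 := by rw [hnil]; rfl
          omega
        · have g0 : (head ++ List.replicate ones '1')[(head ++ List.replicate ones '1').length
              - 2]? = some '1' := by
            have := congrArg (fun t => t[0]?) hc
            simpa [List.getElem?_drop] using this
          have g1 : (head ++ List.replicate ones '1')[(head ++ List.replicate ones '1').length
              - 1]? = some '1' := by
            have := congrArg (fun t => t[1]?) hc
            simp only [List.getElem?_drop] at this
            rw [show (head ++ List.replicate ones '1').length - 2 + 1 =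
              (head ++ List.replicate ones '1').length - 1 by omega] at this
            simpa using this
          by_cases c0 : ones = 0
          · rw [hlen, c0, getElem?_hr, if_pos (by omega)] at g1
            rw [show head.length + 0 - 1 = head.length - 1 by omega] at g1
            exact hlast g1
          · have c1 : ones = 1 := by omega
            rw [hlen, c1, getElem?_hr, if_pos (by omega)] at g0
            rw [show head.length + 1 - 2 = head.length - 1 by omega] at g0
            exact hlast g0
      refine ⟨?_, ?_⟩
      · simp only [solutionStepA, solutionStepB, AbsB]
        rw [if_neg hAcond, if_neg hx1, if_neg hx2]
        simp [List.append_assoc]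
      · simp only [solutionStepB]
        rw [if_neg hx1, if_neg hx2]
        refine ⟨?_, Or.inr ?_, ?_, ?_⟩
        · show headlen + ones + 1 = (head ++ (List.replicate ones '1' ++ [x])).length
          simp [hL]
          omega
        · show (head ++ (List.replicate ones '1' ++ [x]))[(head ++
            (List.replicate ones '1' ++ [x])).length - 1]? ≠ some '1'
          have hlen : (head ++ (List.replicate ones '1' ++ [x])).length - 1 =
              head.length + ones := by
            simp
          rw [hlen, getElem?_hk, if_neg (by omega), if_neg (by omega), if_pos rfl]
          exact fun hc => hx1 (by simpa using hc)
        · show (if f < 0 ∧ 3 ≤ ones then (headlen : Int) else f) =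
            PySem.Chars.find (head ++ (List.replicate ones '1' ++ [x])) ['1', '1', '1']
          rw [find3_chunk head ones x hx1 hE, ← hF, hL]
          have hgef : -1 ≤ f := by
            rw [hF]
            exact PySem.Chars.neg_one_le_find head ['1', '1', '1']
          split_ifs <;> omega
        · show (if x = '0' then ((headlen + ones + 1 : Nat) : Int) - 1 else z) =
            PySem.Chars.rfind (head ++ (List.replicate ones '1' ++ [x])) ['0']
          rw [rfind0_chunk head ones x, ← hZ, hL]
          split_ifs with c
          · push_cast
            ring
          · rfl

lemma fold_sim (cs : List Char) (st : List Char × Nat × Nat × Nat × Int × Int) (hI : InvB st) :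
    cs.foldl solutionStepA (AbsB st) = AbsB (cs.foldl solutionStepB st) ∧
    InvB (cs.foldl solutionStepB st) := by
  induction cs generalizing st with
  | nil => exact ⟨rfl, hI⟩
  | cons c cs ih =>
    obtain ⟨hstep, hgood⟩ := step_sim st c hI
    simp only [List.foldl_cons, hstep]
    exact ih _ hgood

lemma one_eq (str : String) : solutionOneA str = solutionOneB str := by
  have hI0 : InvB ([], 0, 0, 0, -1, -1) := ⟨rfl, Or.inl rfl, by decide, by decide⟩
  obtain ⟨hfold, hI⟩ := fold_sim str.toList ([], 0, 0, 0, -1, -1) hI0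
  simp only [solutionOneA, solutionOneB]
  rcases hst : str.toList.foldl solutionStepB ([], 0, 0, 0, -1, -1) with
    ⟨head, headlen, ones, cnt, f, z⟩
  rw [hst] at hfold hI
  obtain ⟨hL, hE, hF, hZ⟩ := hI
  replace hL : headlen = head.length := hL
  replace hE : head = [] ∨ head[head.length - 1]? ≠ some '1' := hE
  replace hF : f = PySem.Chars.find head ['1', '1', '1'] := hF
  replace hZ : z = PySem.Chars.rfind head ['0'] := hZ
  have hfold' : str.toList.foldl solutionStepA ([], 0) =
      (head ++ List.replicate ones '1', cnt) := hfold
  rw [hfold', hF, hZ, hL]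
  rw [tail_eq head ones cnt hE]

-- ===== VERDICT (by name: the statement is the Claim_ definition above) =====
theorem solution_spec : Claim_equal_solution := by
  intro s _
  unfold Spec_solution solution solution_alt
  rw [PySem.List.foldl_append_singleton_eq_map]
  exact List.map_congr_left fun str _ => one_eq str
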